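-- pv_equiv track=rewrite | github.com/atulanandnitt/questionsBank | advancedDataStructure/string/@revUnique.py | revUnique
-- ===== SOURCE A (Python) =====
-- def revUnique(str1):
--     set1= set()
--     stack1=[]
--     revStr=""
--     for item in str1:
--         stack1.append(item)
--
--
--     while 1:
--
--         try:
--             char1= stack1.pop()
--
--             if char1 in set1 or char1==" ":
--                 continue
--             else:
--                 revStr += char1
--                 set1.add(char1)
--
--         except:
--             break
--
--     return revStr
-- ===== SOURCE B (Python) =====
-- def revUnique(str1):
--     return "".join(dict.fromkeys(c for c in reversed(str1) if c != " "))
-- ===== Notes on version B (the rewrite author's own statement) =====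
-- stated objective: idiomatic
-- what changed: Replaces the explicit stack, pop-until-exception while/try loop, seen-set and string accumulator with a single expression: reverse-iterate, filter spaces, dedup via insertion-ordered dict.fromkeys, join the keys.
import Mathlib
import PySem

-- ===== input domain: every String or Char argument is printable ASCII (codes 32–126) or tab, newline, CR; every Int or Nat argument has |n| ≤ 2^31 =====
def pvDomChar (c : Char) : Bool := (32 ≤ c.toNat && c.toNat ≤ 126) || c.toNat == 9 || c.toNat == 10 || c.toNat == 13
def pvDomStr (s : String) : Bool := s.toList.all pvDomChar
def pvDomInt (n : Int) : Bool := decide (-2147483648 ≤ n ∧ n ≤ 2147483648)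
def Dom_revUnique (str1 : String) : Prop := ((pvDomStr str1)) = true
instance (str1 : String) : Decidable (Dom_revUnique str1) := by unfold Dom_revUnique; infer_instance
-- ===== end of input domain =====

-- B replaces A's stack + pop-until-exception loop + seen-set with one pass:
-- reverse, filter spaces, dedup via insertion-ordered dict.fromkeys, join (idiomatic, not measured faster).

-- ===== PORT A =====
-- the while/try pop loop: pops from the end of stack1, i.e. walks the reversed character list
def revUniqueLoop : List Char → PySem.Set Char → List Char → List Char
  | [], _, revStr => revStr
  | char1 :: rest, set1, revStr =>
      if set1.contains char1 || char1 == ' ' then revUniqueLoop rest set1 revStr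
      else revUniqueLoop rest (set1.add char1) (revStr ++ [char1])

def revUnique (str1 : String) : String :=
  String.ofList (revUniqueLoop str1.toList.reverse PySem.Set.empty [])

-- ===== PORT B =====
def revUnique_alt (str1 : String) : String :=
  String.ofList (PySem.Chars.join []
    ((PySem.List.dedup (str1.toList.reverse.filter (fun c => c != ' '))).map (fun c => [c])))

-- ===== PRECONDITION & SPEC =====
def Spec_revUnique (str1 : String) (out : String) : Prop := out = revUnique_alt str1
instance (str1 : String) (out : String) : Decidable (Spec_revUnique str1 out) := by unfold Spec_revUnique; infer_instance

-- ===== CLAIM (what is proved, stated in full; the proofs are below) =====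
def Claim_equal_revUnique : Prop := ∀ (str1 : String), Dom_revUnique str1 → Spec_revUnique str1 (revUnique str1)

-- ===== LEMMAS AND PROOFS =====
theorem revUniqueLoop_acc (l : List Char) (s : PySem.Set Char) (acc : List Char) :
    revUniqueLoop l s acc = acc ++ revUniqueLoop l s [] := by
  induction l generalizing s acc with
  | nil => simp [revUniqueLoop]
  | cons c rest ih =>
    simp only [revUniqueLoop]
    by_cases h : (s.contains c || c == ' ') = true
    · simp only [h, if_true]
      exact ih s acc
    · rw [Bool.not_eq_true] at h
      simp only [h, Bool.false_eq_true, if_false, List.nil_append]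
      rw [ih (s.add c) (acc ++ [c]), ih (s.add c) [c], List.append_assoc]

theorem revUniqueLoop_eq_foldl (l : List Char) (s : PySem.Set Char) :
    s ++ revUniqueLoop l s [] = (l.filter (fun c => c != ' ')).foldl PySem.Set.add s := by
  induction l generalizing s with
  | nil => simp [revUniqueLoop]
  | cons c rest ih =>
    simp only [revUniqueLoop]
    by_cases hsp : c = ' '
    · have h1 : (s.contains c || c == ' ') = true := by simp [hsp]
      have h2 : (c != ' ') = false := by simp [hsp]
      simp only [h1, if_true, List.filter_cons, h2, Bool.false_eq_true, if_false]
      exact ih s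
    · have h2 : (c != ' ') = true := by simp [hsp]
      simp only [List.filter_cons, h2, if_true, List.foldl_cons]
      by_cases hc : s.contains c = true
      · have h1 : (s.contains c || c == ' ') = true := by simp only [hc, Bool.true_or]
        have hadd : PySem.Set.add s c = s := by simp only [PySem.Set.add, hc, if_true]
        simp only [h1, if_true, hadd]
        exact ih s
      · rw [Bool.not_eq_true] at hc
        have h1 : (s.contains c || c == ' ') = false := by
          simp only [hc, Bool.false_or]
          simpa using hsp
        have hadd : PySem.Set.add s c = s ++ [c] := by
          simp only [PySem.Set.add, hc, Bool.false_eq_true, if_false]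
        simp only [h1, Bool.false_eq_true, if_false, List.nil_append]
        rw [revUniqueLoop_acc rest (s.add c) [c], ← List.append_assoc, ← hadd, ih (s.add c)]

-- ===== VERDICT (by name: the statement is the Claim_ definition above) =====
theorem revUnique_spec : Claim_equal_revUnique := by
  intro str1 _
  unfold Spec_revUnique revUnique revUnique_alt
  rw [PySem.Chars.join_nil_singletons]
  have h := revUniqueLoop_eq_foldl str1.toList.reverse PySem.Set.empty
  simp only [PySem.Set.empty, List.nil_append] at h
  exact congrArg String.ofList h
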